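-- pv_equiv track=rewrite | github.com/galacticue06/expression_evaluater | parse.py | prim_oper
-- ===== SOURCE A (Python) =====
-- def prim_oper(string):
--     mts = '+-*/%^'
--     ret = ''
--     c = 0
--     for i in string:
--         if i in mts:
--             c = 1
--             ret += i
--         else:
--             if c == 1:
--                 break
--             c = 0
--     return ret
-- ===== SOURCE B (Python) =====
-- def prim_oper(string):
--     mts = '+-*/%^'
--     runs = ''.join(ch if ch in mts else '\x00' for ch in string).split('\x00')
--     return next((r for r in runs if r), '')
-- ===== Notes on version B (the rewrite author's own statement) =====
-- stated objective: alternative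
-- what changed: Instead of A's single flagged scan with break, B classifies every character (non-operators become a NUL sentinel), splits the whole string on the sentinel into runs, and returns the first nonempty run.
import Mathlib
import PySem

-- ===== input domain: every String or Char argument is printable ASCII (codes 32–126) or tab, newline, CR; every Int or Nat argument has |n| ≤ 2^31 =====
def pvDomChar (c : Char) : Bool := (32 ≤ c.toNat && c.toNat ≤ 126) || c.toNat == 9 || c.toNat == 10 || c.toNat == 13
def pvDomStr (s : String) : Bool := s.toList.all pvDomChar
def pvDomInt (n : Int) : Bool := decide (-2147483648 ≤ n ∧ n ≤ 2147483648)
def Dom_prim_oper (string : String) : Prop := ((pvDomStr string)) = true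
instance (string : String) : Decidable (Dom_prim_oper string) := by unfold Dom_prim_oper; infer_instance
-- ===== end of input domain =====

-- B replaces A's flagged scan-with-break by classify (non-operators -> NUL sentinel), split on the
-- sentinel into runs, and return the first nonempty run (objective: alternative).

-- membership test 'ch in "+-*/%^"' shared by both ports
def isOp (ch : Char) : Bool := "+-*/%^".toList.contains ch

-- ===== PORT A =====
-- A's loop over the characters with accumulator ret and flag c; the 'break' makes it a recursion.
def prim_oper_go (l : List Char) (c : Int) (ret : List Char) : List Char :=
  match l with
  | [] => ret
  | i :: t =>
    if (isOp i) then prim_oper_go t 1 (ret ++ [i])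
    else if c == 1 then ret
    else prim_oper_go t 0 ret

def prim_oper (string : String) : String :=
  String.mk (prim_oper_go string.toList 0 [])

-- ===== PORT B =====
-- ''.join(ch if ch in mts else '\x00' for ch in string).split('\x00'), then first nonempty run
def prim_oper_alt (string : String) : String :=
  let runs := (string.toList.map (fun ch => if isOp ch then ch else '\x00')).splitOn '\x00'
  String.mk ((runs.find? (fun r => !r.isEmpty)).getD [])

-- ===== PRECONDITION & SPEC =====
def Spec_prim_oper (string : String) (out : String) : Prop := out = prim_oper_alt string
instance (string : String) (out : String) : Decidable (Spec_prim_oper string out) := by unfold Spec_prim_oper; infer_instance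

-- ===== CLAIM (what is proved, stated in full; the proofs are below) =====
def Claim_equal_prim_oper : Prop := ∀ (string : String), Dom_prim_oper string → Spec_prim_oper string (prim_oper string)

-- ===== LEMMAS AND PROOFS =====
theorem prim_oper_go_one (l : List Char) (ret : List Char) :
    prim_oper_go l 1 ret = ret ++ l.takeWhile (fun ch => isOp ch) := by
  induction l generalizing ret with
  | nil => simp [prim_oper_go]
  | cons i t ih =>
    simp only [prim_oper_go, List.takeWhile_cons]
    split
    · next h => simp [ih]
    · next h => simp

theorem prim_oper_go_zero (l : List Char) :
    prim_oper_go l 0 [] =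
      (l.dropWhile (fun ch => !(isOp ch))).takeWhile (fun ch => isOp ch) := by
  induction l with
  | nil => simp [prim_oper_go]
  | cons i t ih =>
    simp only [prim_oper_go, List.dropWhile_cons]
    split
    · next h => simp [h, prim_oper_go_one]
    · next h => simp [h, ih]

theorem op_ne_nul {c : Char} (h : isOp c = true) : (c == '\x00') = false := by
  by_contra hne
  have hb : (c == '\x00') = true := by revert hne; cases (c == '\x00') <;> simp
  have hc : c = '\x00' := eq_of_beq hb
  subst hc
  exact absurd h (by decide)

theorem head_split (t : List Char) :
    ((t.map (fun ch => if isOp ch then ch else '\x00')).splitOnP (· == '\x00')).headD [] =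
      t.takeWhile (fun ch => isOp ch) := by
  induction t with
  | nil => simp
  | cons a s ih =>
    by_cases h : isOp a
    · simp [h, op_ne_nul h, List.headD, ← ih]
      cases hs : (s.map (fun ch => if isOp ch then ch else '\x00')).splitOnP (· == '\x00') with
      | nil => exact absurd hs (List.splitOnP_ne_nil _ _)
      | cons x rest => simp
    · simp [h]

theorem alt_eq_dropTake (l : List Char) :
    (((l.map (fun ch => if isOp ch then ch else '\x00')).splitOn '\x00').find?
        (fun r => !r.isEmpty)).getD [] =
      (l.dropWhile (fun ch => !(isOp ch))).takeWhile (fun ch => isOp ch) := by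
  simp only [List.splitOn]
  induction l with
  | nil => simp
  | cons i t ih =>
    by_cases h : isOp i
    · simp only [List.map_cons, h, if_pos, List.splitOnP_cons, op_ne_nul h, Bool.false_eq_true,
        if_false, List.dropWhile_cons, Bool.not_true, List.takeWhile_cons]
      cases hs : (t.map (fun ch => if isOp ch then ch else '\x00')).splitOnP (· == '\x00') with
      | nil => exact absurd hs (List.splitOnP_ne_nil _ _)
      | cons x rest =>
        have hx : x = List.takeWhile (fun ch => isOp ch) t := by
          have := head_split t
          rwa [hs, List.headD_cons] at this
        simp [List.modifyHead, hx]
    · simp only [List.map_cons, h, Bool.false_eq_true, if_false, List.splitOnP_cons,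
        List.dropWhile_cons, Bool.not_false]
      simpa [List.find?] using ih

-- ===== VERDICT (by name: the statement is the Claim_ definition above) =====
theorem prim_oper_spec : Claim_equal_prim_oper := by
  intro s _
  unfold Spec_prim_oper prim_oper prim_oper_alt
  rw [prim_oper_go_zero]
  exact congrArg String.mk (alt_eq_dropTake s.toList).symm
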